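-- pv_equiv track=rewrite | github.com/jgfranco/formation | 2025_08/steppingNumbers.py | is_stepping_number
-- ===== SOURCE A (Python) =====
-- def is_stepping_number(n):
--     while n >= 10:
--         a = n % 10
--         n = n // 10
--         b = n % 10
--         if abs(a - b) != 1:
--             return False
--     return True
-- ===== SOURCE B (Python) =====
-- def is_stepping_number(n):
--     if n < 10:
--         return True
--     s = str(n)
--     return all(abs(ord(a) - ord(b)) == 1 for a, b in zip(s, s[1:]))
-- ===== Notes on version B (the rewrite author's own statement) =====
-- stated objective: idiomatic
-- what changed: B walks the decimal string representation most-significant-first, checking adjacent character codes with a short-circuiting all() over zip(s, s[1:]), instead of A's while loop peeling digits least-significant-first with mod and floor division.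
import Mathlib
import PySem

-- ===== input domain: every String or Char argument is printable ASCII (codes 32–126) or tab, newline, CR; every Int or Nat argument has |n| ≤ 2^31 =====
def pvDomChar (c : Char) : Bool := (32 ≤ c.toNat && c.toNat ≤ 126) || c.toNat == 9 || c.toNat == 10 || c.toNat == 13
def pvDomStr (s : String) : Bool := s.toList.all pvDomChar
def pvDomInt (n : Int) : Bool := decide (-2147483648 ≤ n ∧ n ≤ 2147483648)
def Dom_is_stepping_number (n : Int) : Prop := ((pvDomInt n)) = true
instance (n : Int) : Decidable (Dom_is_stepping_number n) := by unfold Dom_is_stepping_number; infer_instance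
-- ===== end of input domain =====

-- B walks the decimal string most-significant-first with all() over zip(s, s[1:]) instead of A's mod/floordiv digit-peeling loop; objective: idiomatic.

-- Python floor-division by 10 on Int, cited by the port's decreasing_by
theorem pvFdiv10 (a : Int) : PySem.Int.floordiv a 10 = a / 10 := by
  simp [PySem.Int.floordiv, Int.fdiv_eq_ediv]

-- ===== PORT A =====
-- while n >= 10: a = n % 10; n = n // 10; b = n % 10; if abs(a-b) != 1: return False; return True
def is_stepping_number (n : Int) : Bool :=
  if _h : 10 ≤ n then
    let a := PySem.Int.mod n 10
    let n' := PySem.Int.floordiv n 10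
    let b := PySem.Int.mod n' 10
    if (a - b).natAbs ≠ 1 then false else is_stepping_number n'
  else true
termination_by n.toNat
decreasing_by
  rw [pvFdiv10]
  omega

-- ===== PORT B =====
-- if n < 10: return True
-- s = str(n); return all(abs(ord(a) - ord(b)) == 1 for a, b in zip(s, s[1:]))
def pvStepPair (a b : Char) : Bool := ((a.toNat : Int) - (b.toNat : Int)).natAbs == 1

def is_stepping_number_alt (n : Int) : Bool :=
  if n < 10 then true
  else
    let s := PySem.Int.toChars n
    (s.zip s.tail).all (fun p => pvStepPair p.1 p.2)

-- ===== PRECONDITION & SPEC =====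
def Spec_is_stepping_number (n : Int) (out : Bool) : Prop := out = is_stepping_number_alt n
instance (n : Int) (out : Bool) : Decidable (Spec_is_stepping_number n out) := by unfold Spec_is_stepping_number; infer_instance

-- ===== CLAIM (what is proved, stated in full; the proofs are below) =====
def Claim_equal_is_stepping_number : Prop := ∀ (n : Int), Dom_is_stepping_number n → Spec_is_stepping_number n (is_stepping_number n)

-- ===== LEMMAS AND PROOFS =====

theorem pvFmod10 (a : Int) : PySem.Int.mod a 10 = a % 10 := by
  simp [PySem.Int.mod, Int.fmod_eq_emod]

-- the adjacent-pair check of B, on a plain char list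
def pvChk (s : List Char) : Bool := (s.zip s.tail).all (fun p => pvStepPair p.1 p.2)

theorem pvChk_append (xs : List Char) (l c : Char) (h : xs.getLast? = some l) :
    pvChk (xs ++ [c]) = (pvChk xs && pvStepPair l c) := by
  induction xs with
  | nil => simp at h
  | cons x t ih =>
    cases t with
    | nil =>
      simp only [List.getLast?_singleton, Option.some.injEq] at h
      subst h
      simp [pvChk, List.zip, List.zipWith, List.all]
    | cons y t' =>
      have h' : (y :: t').getLast? = some l := by
        simpa [List.getLast?_cons_cons] using h
      have := ih h'
      simp only [pvChk, List.cons_append, List.tail_cons, List.zip_cons_cons,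
        List.all_cons] at this ⊢
      rw [this, Bool.and_assoc]

-- one unfolding step of Nat.toDigitsCore
theorem pvCore_succ (f n : Nat) (ds : List Char) :
    Nat.toDigitsCore 10 (f + 1) n ds =
      if n / 10 = 0 then Nat.digitChar (n % 10) :: ds
      else Nat.toDigitsCore 10 f (n / 10) (Nat.digitChar (n % 10) :: ds) := by
  simp [Nat.toDigitsCore]

-- Nat.toDigitsCore: the accumulator peels off
theorem pvCore_acc (f : Nat) : ∀ (n : Nat) (ds : List Char),
    Nat.toDigitsCore 10 f n ds = Nat.toDigitsCore 10 f n [] ++ ds := by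
  induction f with
  | zero => intro n ds; simp [Nat.toDigitsCore]
  | succ f ih =>
    intro n ds
    rw [pvCore_succ, pvCore_succ]
    by_cases h : n / 10 = 0
    · simp [h]
    · simp only [if_neg h]
      rw [ih (n / 10) [Nat.digitChar (n % 10)],
          ih (n / 10) (Nat.digitChar (n % 10) :: ds)]
      simp

-- Nat.toDigitsCore: the fuel is irrelevant once it exceeds the number
theorem pvCore_fuel : ∀ (f₁ f₂ n : Nat), n < f₁ → n < f₂ →
    Nat.toDigitsCore 10 f₁ n [] = Nat.toDigitsCore 10 f₂ n [] := by
  intro f₁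
  induction f₁ with
  | zero => intro f₂ n h; omega
  | succ f ih =>
    intro f₂ n h₁ h₂
    cases f₂ with
    | zero => omega
    | succ f₂' =>
      rw [pvCore_succ, pvCore_succ]
      by_cases h : n / 10 = 0
      · simp [h]
      · simp only [if_neg h]
        rw [pvCore_acc f (n / 10), pvCore_acc f₂' (n / 10)]
        have hd : n / 10 < n := Nat.div_lt_self (by omega) (by omega)
        rw [ih f₂' (n / 10) (by omega) (by omega)]

theorem pvToDigits_small (m : Nat) (h : m < 10) :
    Nat.toDigits 10 m = [Nat.digitChar m] := by
  have h1 : m / 10 = 0 := Nat.div_eq_of_lt h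
  have h2 : m % 10 = m := Nat.mod_eq_of_lt h
  show Nat.toDigitsCore 10 (m + 1) m [] = _
  rw [pvCore_succ, if_pos h1, h2]

theorem pvToDigits_step (m : Nat) (h : 10 ≤ m) :
    Nat.toDigits 10 m = Nat.toDigits 10 (m / 10) ++ [Nat.digitChar (m % 10)] := by
  have hne : m / 10 ≠ 0 := by omega
  have hd : m / 10 < m := Nat.div_lt_self (by omega) (by omega)
  show Nat.toDigitsCore 10 (m + 1) m [] = Nat.toDigitsCore 10 (m / 10 + 1) (m / 10) [] ++ _
  rw [pvCore_succ, if_neg hne, pvCore_acc m (m / 10),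
      pvCore_fuel m (m / 10 + 1) (m / 10) (by omega) (by omega)]

theorem pvToDigits_last (m : Nat) :
    (Nat.toDigits 10 m).getLast? = some (Nat.digitChar (m % 10)) := by
  by_cases h : m < 10
  · rw [pvToDigits_small m h, Nat.mod_eq_of_lt h]; rfl
  · rw [pvToDigits_step m (by omega)]
    simp

theorem pvStepPair_digitChar (a b : Nat) (ha : a < 10) (hb : b < 10) :
    pvStepPair (Nat.digitChar a) (Nat.digitChar b)
      = (((a : Int) - (b : Int)).natAbs == 1) := by
  interval_cases a <;> interval_cases b <;> rfl

-- main lemma: A's digit-peeling loop computes B's adjacent-pair check on the decimal digits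
theorem pvMain (m : Nat) : is_stepping_number (m : Int) = pvChk (Nat.toDigits 10 m) := by
  induction m using Nat.strong_induction_on with
  | _ m ih =>
    by_cases h : m < 10
    · rw [pvToDigits_small m h]
      rw [is_stepping_number, dif_neg (by omega)]
      simp [pvChk]
    · have h10 : (10 : Int) ≤ (m : Int) := by omega
      have ha : m / 10 % 10 < 10 := Nat.mod_lt _ (by omega)
      have hb : m % 10 < 10 := Nat.mod_lt _ (by omega)
      have hd : m / 10 < m := Nat.div_lt_self (by omega) (by omega)
      have hfd : PySem.Int.floordiv (m : Int) 10 = ((m / 10 : Nat) : Int) := by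
        rw [pvFdiv10]; omega
      have hfm : PySem.Int.mod (m : Int) 10 = ((m % 10 : Nat) : Int) := by
        rw [pvFmod10]; omega
      have hfm2 : PySem.Int.mod ((m / 10 : Nat) : Int) 10 = ((m / 10 % 10 : Nat) : Int) := by
        rw [pvFmod10]; omega
      rw [is_stepping_number, dif_pos h10]
      simp only [hfm, hfd, hfm2]
      rw [pvToDigits_step m (by omega),
          pvChk_append _ _ _ (pvToDigits_last (m / 10)),
          pvStepPair_digitChar _ _ ha hb,
          ← ih (m / 10) hd]
      by_cases hc : (((m % 10 : Nat) : Int) - ((m / 10 % 10 : Nat) : Int)).natAbs = 1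
      · rw [if_neg (by omega)]
        have heq : (((m : Int) / 10 % 10) - (m : Int) % 10).natAbs = 1 := by omega
        simp [heq]
      · rw [if_pos (by omega)]
        have hne : (((m : Int) / 10 % 10) - (m : Int) % 10).natAbs ≠ 1 := by omega
        simp [hne]

-- ===== VERDICT (by name: the statement is the Claim_ definition above) =====
theorem is_stepping_number_spec : Claim_equal_is_stepping_number := by
  intro n _
  unfold Spec_is_stepping_number
  by_cases h : n < 10
  · rw [is_stepping_number, is_stepping_number_alt, dif_neg (by omega), if_pos h]
  · have hmain := pvMain n.toNat
    have hcast : ((n.toNat : Nat) : Int) = n := by omega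
    rw [hcast] at hmain
    rw [hmain, is_stepping_number_alt, if_neg h]
    simp only [PySem.Int.toChars, if_neg (show ¬ n < 0 by omega)]
    rfl
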